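-- pv_equiv track=rewrite | github.com/kSiadat/patterns | bloom/bloom.py | step
-- ===== SOURCE A (Python) =====
-- def left(plane):
--     if plane[0] == 0:
--         return [-plane[1], 0]
--     return [0, plane[0]]
--
-- def right(plane):
--     if plane[0] == 0:
--         return [plane[1], 0]
--     return [0, -plane[0]]
--
-- def step(pos, plane, scale):
--     if scale > 1:
--         diff = [plane[x] * scale  for x in range(2)]
--         end = [pos[x] + diff[x] - plane[x]  for x in range(2)]
--         lines = [[pos[:], diff[:]]]
--         new_scale = scale // 2
--         lines += step(end, left(plane), new_scale)
--         lines += step(end, plane, new_scale)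
--         lines += step(end, right(plane), new_scale)
--         return lines
--     return []
-- ===== SOURCE B (Python) =====
-- def left(plane):
--     if plane[0] == 0:
--         return [-plane[1], 0]
--     return [0, plane[0]]
--
-- def right(plane):
--     if plane[0] == 0:
--         return [plane[1], 0]
--     return [0, -plane[0]]
--
-- def step(pos, plane, scale):
--     # Iterative pre-order traversal with an explicit stack instead of recursion.
--     result = []
--     stack = [(pos, plane, scale)]
--     while stack:
--         p, pl, sc = stack.pop()
--         if sc > 1:
--             diff = [pl[0] * sc, pl[1] * sc]
--             end = [p[0] + diff[0] - pl[0], p[1] + diff[1] - pl[1]]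
--             result.append([p[:], diff])
--             ns = sc // 2
--             # push children right -> same -> left so they pop left/same/right
--             stack.append((end, right(pl), ns))
--             stack.append((end, pl, ns))
--             stack.append((end, left(pl), ns))
--     return result
-- ===== Notes on version B (the rewrite author's own statement) =====
-- stated objective: alternative
-- what changed: Replaces the triple-recursive pre-order generation with an iterative loop over an explicit stack (children pushed right/same/left so they pop in the original visiting order), accumulating segments in a result list.
import Mathlib
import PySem

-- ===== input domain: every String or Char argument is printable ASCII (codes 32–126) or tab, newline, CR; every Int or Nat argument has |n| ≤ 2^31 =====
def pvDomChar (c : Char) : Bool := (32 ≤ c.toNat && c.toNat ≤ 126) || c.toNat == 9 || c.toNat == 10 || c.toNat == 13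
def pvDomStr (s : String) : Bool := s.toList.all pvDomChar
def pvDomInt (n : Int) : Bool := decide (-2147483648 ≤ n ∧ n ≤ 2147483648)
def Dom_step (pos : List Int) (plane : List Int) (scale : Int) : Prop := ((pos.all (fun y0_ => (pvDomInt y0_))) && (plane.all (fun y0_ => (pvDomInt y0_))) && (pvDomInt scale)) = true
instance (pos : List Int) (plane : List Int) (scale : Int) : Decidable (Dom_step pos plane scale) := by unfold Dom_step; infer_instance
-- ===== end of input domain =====

-- B replaces the triple recursion by an iterative explicit-stack pre-order loop (alternative decomposition, same cost).


-- ===== PORT A =====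
-- helper: xs[i] under Pre_ (in-range by Pre_step; default irrelevant there)
def pyAt (xs : List Int) (i : Int) : Int := PySem.List.pyGetD xs i 0

def leftP (plane : List Int) : List Int :=
  if pyAt plane 0 = 0 then [-(pyAt plane 1), 0] else [0, pyAt plane 0]

def rightP (plane : List Int) : List Int :=
  if pyAt plane 0 = 0 then [pyAt plane 1, 0] else [0, -(pyAt plane 0)]

theorem pv_floordiv2_toNat_lt (sc : Int) (h : sc > 1) :
    (PySem.Int.floordiv sc 2).toNat < sc.toNat := by
  rw [PySem.Int.floordiv_eq_ediv_of_pos (by omega)]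
  omega

def step (pos : List Int) (plane : List Int) (scale : Int) : List (List (List Int)) :=
  if h : scale > 1 then
    let diff : List Int := [pyAt plane 0 * scale, pyAt plane 1 * scale]
    let endp : List Int := [pyAt pos 0 + pyAt diff 0 - pyAt plane 0,
                            pyAt pos 1 + pyAt diff 1 - pyAt plane 1]
    let ns := PySem.Int.floordiv scale 2
    [[pos, diff]] ++ step endp (leftP plane) ns ++ step endp plane ns ++ step endp (rightP plane) ns
  else []
termination_by scale.toNat
decreasing_by all_goals exact pv_floordiv2_toNat_lt scale h

-- ===== PORT B =====
-- weight of one stack entry's scale (size of its generated tree); used only for termination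
def bloomWeight (sc : Int) : Nat :=
  if h : sc > 1 then 1 + 3 * bloomWeight (PySem.Int.floordiv sc 2) else 1
termination_by sc.toNat
decreasing_by exact pv_floordiv2_toNat_lt sc h

theorem bloomWeight_pos (sc : Int) : 0 < bloomWeight sc := by
  unfold bloomWeight; split <;> omega

-- the while loop of B: result accumulator + stack of (pos, plane, scale)
def stepLoop (result : List (List (List Int))) (stack : List (List Int × List Int × Int)) :
    List (List (List Int)) :=
  match stack with
  | [] => result
  | (p, pl, sc) :: rest =>
    if h : sc > 1 then
      let diff : List Int := [pyAt pl 0 * sc, pyAt pl 1 * sc]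
      let endp : List Int := [pyAt p 0 + pyAt diff 0 - pyAt pl 0,
                              pyAt p 1 + pyAt diff 1 - pyAt pl 1]
      let ns := PySem.Int.floordiv sc 2
      stepLoop (result ++ [[p, diff]])
        ((endp, leftP pl, ns) :: (endp, pl, ns) :: (endp, rightP pl, ns) :: rest)
    else
      stepLoop result rest
termination_by (stack.map (fun t => bloomWeight t.2.2)).sum
decreasing_by
  · simp only [List.map_cons, List.sum_cons]
    have : bloomWeight sc = 1 + 3 * bloomWeight (PySem.Int.floordiv sc 2) := by
      rw [bloomWeight]; simp [h]
    omega
  · simp only [List.map_cons, List.sum_cons]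
    have := bloomWeight_pos sc
    omega

def step_alt (pos : List Int) (plane : List Int) (scale : Int) : List (List (List Int)) :=
  stepLoop [] [(pos, plane, scale)]

-- ===== PRECONDITION & SPEC =====
-- Pre_ excludes exactly the inputs where A raises IndexError: scale > 1 with pos or plane shorter than 2.
def Pre_step (pos : List Int) (plane : List Int) (scale : Int) : Prop :=
  scale > 1 → (2 ≤ pos.length ∧ 2 ≤ plane.length)
instance (pos : List Int) (plane : List Int) (scale : Int) : Decidable (Pre_step pos plane scale) := by
  unfold Pre_step; infer_instance

def pvWitness_step : List Int × List Int × Int := ([0, 0], [0, 1], 8)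

def Spec_step (pos : List Int) (plane : List Int) (scale : Int) (out : List (List (List Int))) : Prop := out = step_alt pos plane scale
instance (pos : List Int) (plane : List Int) (scale : Int) (out : List (List (List Int))) : Decidable (Spec_step pos plane scale out) := by unfold Spec_step; infer_instance

-- ===== CLAIM (what is proved, stated in full; the proofs are below) =====
def Claim_equal_step : Prop := ∀ (pos : List Int) (plane : List Int) (scale : Int), Dom_step pos plane scale → Pre_step pos plane scale → Spec_step pos plane scale (step pos plane scale)

-- ===== LEMMAS AND PROOFS =====
-- popping one frame produces exactly that frame's recursive output, appended to the accumulator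
theorem stepLoop_frame (sc : Int) (p pl : List Int)
    (rest : List (List Int × List Int × Int)) (result : List (List (List Int))) :
    stepLoop result ((p, pl, sc) :: rest) = stepLoop (result ++ step p pl sc) rest := by
  by_cases h : sc > 1
  · rw [stepLoop, step]
    simp only [h, dif_pos]
    rw [stepLoop_frame, stepLoop_frame, stepLoop_frame]
    simp [List.append_assoc]
  · rw [stepLoop, step]
    simp [h]
termination_by sc.toNat
decreasing_by all_goals exact pv_floordiv2_toNat_lt sc h

-- ===== VERDICT (by name: the statement is the Claim_ definition above) =====
theorem step_spec : Claim_equal_step := by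
  intro pos plane scale _ _
  unfold Spec_step step_alt
  rw [stepLoop_frame]
  simp [stepLoop]
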